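-- pv_equiv track=rewrite | github.com/Fanusaez/TP3-Algo2 | algopoli.py | procesar_label
-- ===== SOURCE A (Python) =====
-- import operator
--
-- def procesar_label(label, n):
--     """ Lee el diccionario label y lo ordena por comunidades, devuelve un diccioanrio """
--     label = sorted(label.items(), key=operator.itemgetter(1), reverse=True)
--     comunidad = []
--     label_comunidades = {}
--     comun_actual = -1
--
--     for v, comun in label:
--         if comun_actual == -1: comun_actual = comun
--         if comun_actual != comun:
--             label_comunidades[comun_actual] = comunidad
--             comunidad = []
--             comun_actual = comun
--         comunidad.append(v)
--         if label[len(label)-1][1] == comun_actual: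
--             label_comunidades[comun_actual] = comunidad
--     return label_comunidades
-- ===== SOURCE B (Python) =====
-- def procesar_label(label, n):
--     """Group keys by community, communities in descending order; one grouping pass plus a sort of the distinct communities."""
--     groups = {}
--     for k, c in label.items():
--         groups.setdefault(c, []).append(k)
--     res = {}
--     for c in sorted(groups, reverse=True):
--         res[c] = groups[c]
--     return res
-- ===== Notes on version B (the rewrite author's own statement) =====
-- stated objective: simpler
-- what changed: B replaces A's sort-everything-then-detect-group-boundaries state machine (current-community sentinel, last-element flush check) by one grouping pass over the dict building community -> keys lists, followed by a sort of only the distinct communities in descending order (constant-factor faster: only k distinct communities are sorted, not all n items).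
-- intended difference: On inputs where some entry has community -1 and another has community < -1, A's comun_actual=-1 start sentinel is re-triggered, so A silently merges the -1 group into the following smaller community and drops key -1 (e.g. {'a': -1, 'b': -2} -> {-2: ['a','b']}), while B returns every community as its own group ({-1: ['a'], -2: ['b']}), which is the intended grouping. — e.g. on procesar_label([("a", -1), ("b", -2)], 0): A returns [(-2, ["a", "b"])], B returns [(-1, ["a"]), (-2, ["b"])]
import Mathlib
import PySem

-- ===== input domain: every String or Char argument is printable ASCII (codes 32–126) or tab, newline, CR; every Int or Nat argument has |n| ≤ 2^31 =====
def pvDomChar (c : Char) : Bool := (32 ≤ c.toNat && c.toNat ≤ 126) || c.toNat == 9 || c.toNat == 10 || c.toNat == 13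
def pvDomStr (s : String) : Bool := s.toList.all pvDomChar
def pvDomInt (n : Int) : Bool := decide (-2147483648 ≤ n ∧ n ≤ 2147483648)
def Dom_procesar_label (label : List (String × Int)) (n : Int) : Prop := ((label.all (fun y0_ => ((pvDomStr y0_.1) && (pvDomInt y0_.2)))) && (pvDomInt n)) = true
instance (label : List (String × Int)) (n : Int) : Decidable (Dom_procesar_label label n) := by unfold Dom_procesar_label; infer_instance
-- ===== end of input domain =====

-- B groups the entries by community in one pass and sorts only the distinct communities (descending),
-- instead of A's full stable sort plus boundary-detection state machine (objective: simpler).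

-- ===== PORT A =====
-- literal port: label = sorted(label.items(), key=itemgetter(1), reverse=True), then the loop with
-- state (comunidad, label_comunidades, comun_actual); returned dict as its items list.
def procesar_label (label : List (String × Int)) (n : Int) : List (Int × List String) :=
  let s := PySem.List.sorted label (fun p => p.2) true
  (s.foldl
    (fun (st : List String × PySem.Dict Int (List String) × Int) p =>
      let cur0 := if st.2.2 = -1 then p.2 else st.2.2
      let st1 := if cur0 ≠ p.2 then (([] : List String), st.2.1.insert cur0 st.1, p.2)
                 else (st.1, st.2.1, cur0)
      let com2 := st1.1 ++ [p.1]
      let d2 := if (PySem.List.pyGetD s (PySem.List.len s - 1) ("", 0)).2 = st1.2.2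
                then st1.2.1.insert st1.2.2 com2 else st1.2.1
      (com2, d2, st1.2.2))
    ([], PySem.Dict.empty, -1)).2.1.items

-- ===== PORT B =====
-- literal port of Source B: groups.setdefault(c, []).append(k) is Dict.modify c [] (· ++ [k]);
-- groups[c] with c a key of groups is Dict.getD c [].
def procesar_label_alt (label : List (String × Int)) (n : Int) : List (Int × List String) :=
  let groups := label.foldl (fun d p => d.modify p.2 [] (fun l => l ++ [p.1]))
      (PySem.Dict.empty : PySem.Dict Int (List String))
  ((PySem.List.sorted groups.keys (fun c => c) true).foldl
      (fun d c => d.insert c (groups.getD c []))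
      (PySem.Dict.empty : PySem.Dict Int (List String))).items

-- ===== PRECONDITION & SPEC =====
-- On inputs where some entry has community -1 and another has community < -1, A's comun_actual = -1
-- start sentinel is re-triggered, so A merges the -1 group into the following smaller community and
-- drops key -1; B returns every community as its own group, the intended grouping.
def D_procesar_label (label : List (String × Int)) (n : Int) : Prop :=
  (∃ p ∈ label, p.2 = -1) ∧ (∃ p ∈ label, p.2 < -1)
instance (label : List (String × Int)) (n : Int) : Decidable (D_procesar_label label n) := by
  unfold D_procesar_label; infer_instance

def Spec_procesar_label (label : List (String × Int)) (n : Int) (out : List (Int × List String)) : Prop :=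
  ¬ D_procesar_label label n → out = procesar_label_alt label n
instance (label : List (String × Int)) (n : Int) (out : List (Int × List String)) : Decidable (Spec_procesar_label label n out) := by
  unfold Spec_procesar_label; infer_instance

def pvDiffWitness_procesar_label : (List (String × Int)) × Int := ([("a", -1), ("b", -2)], 0)
def pvDiffWitnessOut_procesar_label : (List (Int × List String)) × (List (Int × List String)) :=
  ([(-2, ["a", "b"])], [(-1, ["a"]), (-2, ["b"])])

-- ===== CLAIM (what is proved, stated in full; the proofs are below) =====
def Claim_unchanged_procesar_label : Prop := ∀ (label : List (String × Int)) (n : Int), Dom_procesar_label label n → Spec_procesar_label label n (procesar_label label n)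
def Claim_changed_procesar_label : Prop := Dom_procesar_label (pvDiffWitness_procesar_label.1) (pvDiffWitness_procesar_label.2) ∧ D_procesar_label (pvDiffWitness_procesar_label.1) (pvDiffWitness_procesar_label.2) ∧ procesar_label (pvDiffWitness_procesar_label.1) (pvDiffWitness_procesar_label.2) = pvDiffWitnessOut_procesar_label.1 ∧ procesar_label_alt (pvDiffWitness_procesar_label.1) (pvDiffWitness_procesar_label.2) = pvDiffWitnessOut_procesar_label.2 ∧ pvDiffWitnessOut_procesar_label.1 ≠ pvDiffWitnessOut_procesar_label.2
def Claim_exact_procesar_label : Prop := ∀ (label : List (String × Int)) (n : Int), Dom_procesar_label label n → D_procesar_label label n → procesar_label label n ≠ procesar_label_alt label n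

-- ===== LEMMAS AND PROOFS =====

-- A's loop body, with the (constant) last sorted community m abstracted out.
def pvStep (m : Int) (st : List String × PySem.Dict Int (List String) × Int) (p : String × Int) :
    List String × PySem.Dict Int (List String) × Int :=
  let cur0 := if st.2.2 = -1 then p.2 else st.2.2
  let st1 := if cur0 ≠ p.2 then (([] : List String), st.2.1.insert cur0 st.1, p.2)
             else (st.1, st.2.1, cur0)
  let com2 := st1.1 ++ [p.1]
  let d2 := if m = st1.2.2 then st1.2.1.insert st1.2.2 com2 else st1.2.1
  (com2, d2, st1.2.2)

-- the maximal blocks of consecutive equal communities, with an open block (cur, com) in front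
def pvBlocks (cur : Int) (com : List String) : List (String × Int) → List (Int × List String)
  | [] => [(cur, com)]
  | p :: t => if p.2 = cur then pvBlocks cur (com ++ [p.1]) t
              else (cur, com) :: pvBlocks p.2 [p.1] t

theorem pvBlocks_head (t : List (String × Int)) (cur : Int) (com : List String) :
    ∃ g bs, pvBlocks cur com t = (cur, g) :: bs := by
  induction t generalizing com with
  | nil => exact ⟨com, [], rfl⟩
  | cons p t ih =>
    by_cases h : p.2 = cur
    · simpa [pvBlocks, h] using ih (com ++ [p.1])
    · exact ⟨com, pvBlocks p.2 [p.1] t, by simp [pvBlocks, h]⟩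

theorem pvBlocks_keys_mem (t : List (String × Int)) (cur x : Int) (com : List String) :
    x ∈ (pvBlocks cur com t).map Prod.fst ↔ x = cur ∨ x ∈ t.map (fun p => p.2) := by
  induction t generalizing cur com with
  | nil => simp [pvBlocks]
  | cons p t ih =>
    by_cases h : p.2 = cur
    · rw [show pvBlocks cur com (p :: t) = pvBlocks cur (com ++ [p.1]) t from by simp [pvBlocks, h]]
      rw [ih]
      constructor
      · rintro (rfl | hx)
        · exact Or.inl rfl
        · exact Or.inr (by simp; right; simpa using hx)
      · rintro (rfl | hx)
        · exact Or.inl rfl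
        · rcases (by simpa using hx : x = p.2 ∨ x ∈ t.map (fun p => p.2)) with rfl | hx
          · exact Or.inl h
          · exact Or.inr hx
    · rw [show pvBlocks cur com (p :: t) = (cur, com) :: pvBlocks p.2 [p.1] t from by simp [pvBlocks, h]]
      rw [List.map_cons, List.mem_cons, ih]
      simp

theorem pvBlocks_keys_pairwise (t : List (String × Int)) (cur : Int) (com : List String)
    (hp : t.Pairwise (fun a b => b.2 ≤ a.2)) (hb : ∀ p ∈ t, p.2 ≤ cur) :
    ((pvBlocks cur com t).map Prod.fst).Pairwise (fun a b => b < a) := by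
  induction t generalizing cur com with
  | nil => simp [pvBlocks]
  | cons p t ih =>
    rw [List.pairwise_cons] at hp
    by_cases h : p.2 = cur
    · rw [show pvBlocks cur com (p :: t) = pvBlocks cur (com ++ [p.1]) t from by simp [pvBlocks, h]]
      exact ih cur (com ++ [p.1]) hp.2 (fun q hq => h ▸ hp.1 q hq)
    · rw [show pvBlocks cur com (p :: t) = (cur, com) :: pvBlocks p.2 [p.1] t from by simp [pvBlocks, h]]
      rw [List.map_cons, List.pairwise_cons]
      refine ⟨?_, ih p.2 [p.1] hp.2 (fun q hq => hp.1 q hq)⟩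
      intro y hy
      rcases (pvBlocks_keys_mem t p.2 y [p.1]).1 hy with rfl | hy
      · exact lt_of_le_of_ne (hb p (by simp)) h
      · rcases List.mem_map.1 hy with ⟨q, hq, rfl⟩
        exact lt_of_le_of_lt (hp.1 q hq) (lt_of_le_of_ne (hb p (by simp)) h)

theorem pvFilter_eq_nil (t : List (String × Int)) (c : Int) (h : ∀ p ∈ t, p.2 ≠ c) :
    t.filter (fun p => p.2 == c) = [] := by
  rw [List.filter_eq_nil_iff]
  intro p hp
  simpa using h p hp

theorem pvBlocks_content (t : List (String × Int)) (cur : Int) (com : List String)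
    (hp : t.Pairwise (fun a b => b.2 ≤ a.2)) (hb : ∀ p ∈ t, p.2 ≤ cur) :
    ∀ c g, (c, g) ∈ pvBlocks cur com t →
      g = (if c = cur then com else []) ++ (t.filter (fun p => p.2 == c)).map Prod.fst := by
  induction t generalizing cur com with
  | nil =>
    intro c g hcg
    rcases (by simpa [pvBlocks] using hcg : c = cur ∧ g = com) with ⟨rfl, rfl⟩
    simp
  | cons p t ih =>
    rw [List.pairwise_cons] at hp
    intro c g hcg
    by_cases h : p.2 = cur
    · rw [show pvBlocks cur com (p :: t) = pvBlocks cur (com ++ [p.1]) t from by simp [pvBlocks, h]] at hcg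
      have hrec := ih cur (com ++ [p.1]) hp.2 (fun q hq => h ▸ hp.1 q hq) c g hcg
      by_cases hc : c = cur
      · have hpc : (p.2 == c) = true := by simp [h, hc]
        rw [hrec, if_pos hc, if_pos hc, List.filter_cons, hpc]
        simp
      · have hpc : (p.2 == c) = false := by
          simp only [beq_eq_false_iff_ne, ne_eq]
          exact fun hh => hc (by rw [← hh, h])
        rw [hrec, if_neg hc, if_neg hc, List.filter_cons, hpc]
        simp
    · rw [show pvBlocks cur com (p :: t) = (cur, com) :: pvBlocks p.2 [p.1] t from by simp [pvBlocks, h]] at hcg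
      have hplt : p.2 < cur := lt_of_le_of_ne (hb p (by simp)) h
      rcases List.mem_cons.1 hcg with hcg | hcg
      · rcases (by simpa using hcg : c = cur ∧ g = com) with ⟨rfl, rfl⟩
        have hnil : (p :: t).filter (fun q => q.2 == c) = [] := by
          apply pvFilter_eq_nil
          intro q hq
          rcases List.mem_cons.1 hq with rfl | hq
          · exact h
          · exact ne_of_lt (lt_of_le_of_lt (hp.1 q hq) hplt)
        simp [hnil]
      · have hc : c ≠ cur := by
          have hmem : c ∈ (pvBlocks p.2 [p.1] t).map Prod.fst := List.mem_map.2 ⟨(c, g), hcg, rfl⟩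
          rcases (pvBlocks_keys_mem t p.2 c [p.1]).1 hmem with rfl | hmem
          · exact ne_of_lt hplt
          · rcases List.mem_map.1 hmem with ⟨q, hq, rfl⟩
            exact ne_of_lt (lt_of_le_of_lt (hp.1 q hq) hplt)
        have hrec := ih p.2 [p.1] hp.2 (fun q hq => hp.1 q hq) c g hcg
        rw [if_neg hc, hrec, List.filter_cons]
        by_cases hcp : c = p.2
        · have hpc : (p.2 == c) = true := by simp [hcp]
          rw [if_pos hcp, hpc]
          simp
        · have hpc : (p.2 == c) = false := by
            simp only [beq_eq_false_iff_ne, ne_eq]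
            exact fun hh => hcp hh.symm
          rw [if_neg hcp, hpc]
          simp

theorem pvPairwise_getLast_le (t : List (String × Int)) (q : String × Int)
    (hp : t.Pairwise (fun a b => b.2 ≤ a.2)) (hl : t.getLast? = some q) :
    ∀ p ∈ t, q.2 ≤ p.2 := by
  induction t with
  | nil => simp at hl
  | cons x t ih =>
    rw [List.pairwise_cons] at hp
    cases t with
    | nil =>
      simp at hl
      subst hl
      simp
    | cons y t' =>
      rw [List.getLast?_cons_cons] at hl
      intro p hp'
      rcases List.mem_cons.1 hp' with rfl | hp'
      · exact hp.1 q (List.mem_of_getLast? hl)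
      · exact ih hp.2 hl p hp'

-- the A-loop computed as sequential insertion of the blocks
theorem pvLoopA (m : Int) (t : List (String × Int)) :
    ∀ (com : List String) (d : PySem.Dict Int (List String)) (cur : Int),
    t ≠ [] →
    t.Pairwise (fun a b => b.2 ≤ a.2) →
    (∀ p ∈ t, p.2 ≤ cur) →
    (∀ p ∈ t, m ≤ p.2) →
    (∀ q, t.getLast? = some q → q.2 = m) →
    ((∃ p ∈ t, p.2 = -1) → -1 ≤ m) →
    (cur = -1 → ∀ p ∈ t, p.2 = -1) →
    (t.foldl (pvStep m) (com, d, cur)).2.1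
      = (pvBlocks cur com t).foldl (fun d p => d.insert p.1 p.2) d := by
  induction t with
  | nil => intro com d cur hne; exact absurd rfl hne
  | cons p t ih =>
    intro com d cur _ hp hb hm hlast hD hcur
    rw [List.pairwise_cons] at hp
    by_cases hc : p.2 = cur
    · -- continue the open block
      subst hc
      have hstep : pvStep m (com, d, p.2) p
          = (com ++ [p.1], if m = p.2 then d.insert p.2 (com ++ [p.1]) else d, p.2) := by
        by_cases hp2 : p.2 = -1 <;> simp [pvStep, hp2]
      have hblocks : pvBlocks p.2 com (p :: t) = pvBlocks p.2 (com ++ [p.1]) t := by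
        simp [pvBlocks]
      rw [List.foldl_cons, hstep, hblocks]
      cases t with
      | nil =>
        have hcm : m = p.2 := (hlast p (by simp)).symm
        simp [pvBlocks, hcm]
      | cons y t' =>
        have htail :
            (List.foldl (pvStep m)
                (com ++ [p.1], if m = p.2 then d.insert p.2 (com ++ [p.1]) else d, p.2) (y :: t')).2.1
              = (pvBlocks p.2 (com ++ [p.1]) (y :: t')).foldl (fun d p => d.insert p.1 p.2)
                  (if m = p.2 then d.insert p.2 (com ++ [p.1]) else d) := by
          apply ih (com ++ [p.1]) _ p.2 (by simp)
          · exact hp.2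
          · exact fun q hq => hp.1 q hq
          · exact fun q hq => hm q (by simp [hq])
          · intro q hq
            exact hlast q (by rw [List.getLast?_cons_cons]; exact hq)
          · intro ⟨q, hq, hq2⟩
            exact hD ⟨q, by simp [hq], hq2⟩
          · intro hcur1
            exact fun q hq => hcur hcur1 q (by simp [hq])
        rw [htail]
        by_cases hmcur : m = p.2
        · rcases pvBlocks_head (y :: t') p.2 (com ++ [p.1]) with ⟨g, bs, heq⟩
          rw [heq, if_pos hmcur, List.foldl_cons, List.foldl_cons,
            PySem.Dict.insert_insert_self]
        · rw [if_neg hmcur]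
    · -- close the block, open a new one
      have hcur1 : cur ≠ -1 := by
        intro hcur1
        exact hc (by rw [hcur hcur1 p (by simp), hcur1])
      have hc' : ¬ (cur = p.2) := fun hh => hc hh.symm
      have hstep : pvStep m (com, d, cur) p
          = ([p.1],
             if m = p.2 then (d.insert cur com).insert p.2 [p.1] else d.insert cur com,
             p.2) := by
        simp [pvStep, hcur1, hc']
      have hblocks : pvBlocks cur com (p :: t) = (cur, com) :: pvBlocks p.2 [p.1] t := by
        simp [pvBlocks, hc]
      rw [List.foldl_cons, hstep, hblocks, List.foldl_cons]
      cases t with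
      | nil =>
        have hcm : m = p.2 := (hlast p (by simp)).symm
        simp [pvBlocks, hcm]
      | cons y t' =>
        have htail :
            (List.foldl (pvStep m)
                ([p.1], if m = p.2 then (d.insert cur com).insert p.2 [p.1] else d.insert cur com, p.2)
                (y :: t')).2.1
              = (pvBlocks p.2 [p.1] (y :: t')).foldl (fun d p => d.insert p.1 p.2)
                  (if m = p.2 then (d.insert cur com).insert p.2 [p.1] else d.insert cur com) := by
          apply ih [p.1] _ p.2 (by simp)
          · exact hp.2
          · exact fun q hq => hp.1 q hq
          · exact fun q hq => hm q (by simp [hq])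
          · intro q hq
            exact hlast q (by rw [List.getLast?_cons_cons]; exact hq)
          · intro ⟨q, hq, hq2⟩
            exact hD ⟨q, by simp [hq], hq2⟩
          · intro hp2 q hq
            have h1 : -1 ≤ m := hD ⟨p, by simp, hp2⟩
            have h2 : m ≤ q.2 := hm q (by simp [hq])
            have h3 : q.2 ≤ p.2 := hp.1 q hq
            omega
        rw [htail]
        by_cases hmp : m = p.2
        · rcases pvBlocks_head (y :: t') p.2 [p.1] with ⟨g, bs, heq⟩
          rw [heq, if_pos hmp, List.foldl_cons, List.foldl_cons,
            PySem.Dict.insert_insert_self]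
        · rw [if_neg hmp]

-- stability of reverse-sorting by community w.r.t. filtering by a community value
theorem pvInsertBy_pairwise (x : String × Int) (acc : List (String × Int))
    (hp : acc.Pairwise (fun a b => b.2 ≤ a.2)) :
    (PySem.List.insertBy (fun a b => decide ((b.2 : Int) < a.2)) x acc).Pairwise
      (fun a b => b.2 ≤ a.2) := by
  induction acc with
  | nil => simp [PySem.List.insertBy]
  | cons y ys ih =>
    rw [List.pairwise_cons] at hp
    by_cases h : (y.2 : Int) < x.2
    · rw [show PySem.List.insertBy (fun a b => decide ((b.2 : Int) < a.2)) x (y :: ys)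
          = x :: y :: ys from by simp [PySem.List.insertBy, h]]
      rw [List.pairwise_cons]
      refine ⟨?_, List.pairwise_cons.2 hp⟩
      intro z hz
      rcases List.mem_cons.1 hz with rfl | hz
      · exact le_of_lt h
      · exact le_of_lt (lt_of_le_of_lt (hp.1 z hz) h)
    · rw [show PySem.List.insertBy (fun a b => decide ((b.2 : Int) < a.2)) x (y :: ys)
          = y :: PySem.List.insertBy (fun a b => decide ((b.2 : Int) < a.2)) x ys from by
            simp [PySem.List.insertBy, h]]
      rw [List.pairwise_cons]
      refine ⟨?_, ih hp.2⟩
      intro z hz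
      rcases (PySem.List.mem_insertBy _ _ _ _).1 hz with rfl | hz
      · omega
      · exact hp.1 z hz

theorem pvInsertBy_filter (c : Int) (x : String × Int) (acc : List (String × Int))
    (hp : acc.Pairwise (fun a b => b.2 ≤ a.2)) :
    (PySem.List.insertBy (fun a b => decide ((b.2 : Int) < a.2)) x acc).filter (fun p => p.2 == c)
      = acc.filter (fun p => p.2 == c) ++ (if x.2 = c then [x] else []) := by
  induction acc with
  | nil => by_cases hx : x.2 = c <;> simp [PySem.List.insertBy, hx]
  | cons y ys ih =>
    rw [List.pairwise_cons] at hp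
    by_cases h : (y.2 : Int) < x.2
    · rw [show PySem.List.insertBy (fun a b => decide ((b.2 : Int) < a.2)) x (y :: ys)
          = x :: y :: ys from by simp [PySem.List.insertBy, h]]
      by_cases hx : x.2 = c
      · have hnil : (y :: ys).filter (fun p => p.2 == c) = [] := by
          apply pvFilter_eq_nil
          intro q hq
          rcases List.mem_cons.1 hq with rfl | hq
          · omega
          · have := hp.1 q hq
            omega
        rw [List.filter_cons, if_pos (by simp [hx]), hnil]
        simp [hx]
      · rw [List.filter_cons, if_neg (by simp [hx])]
        simp [hx]
    · rw [show PySem.List.insertBy (fun a b => decide ((b.2 : Int) < a.2)) x (y :: ys)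
          = y :: PySem.List.insertBy (fun a b => decide ((b.2 : Int) < a.2)) x ys from by
            simp [PySem.List.insertBy, h]]
      rw [List.filter_cons, List.filter_cons, ih hp.2]
      by_cases hy : (y.2 == c) = true <;> simp [hy]

theorem pvFoldl_insertBy_filter (c : Int) (xs : List (String × Int)) :
    ∀ acc : List (String × Int), acc.Pairwise (fun a b => b.2 ≤ a.2) →
    (xs.foldl (fun acc x => PySem.List.insertBy (fun a b => decide ((b.2 : Int) < a.2)) x acc)
        acc).filter (fun p => p.2 == c)
      = acc.filter (fun p => p.2 == c) ++ xs.filter (fun p => p.2 == c) := by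
  induction xs with
  | nil => intro acc _; simp
  | cons x xs ih =>
    intro acc h
    rw [List.foldl_cons, ih _ (pvInsertBy_pairwise x acc h), pvInsertBy_filter c x acc h,
      List.filter_cons]
    by_cases hx : x.2 = c <;> simp [hx]

theorem pvFilter_sorted (xs : List (String × Int)) (c : Int) :
    (PySem.List.sorted xs (fun p => p.2) true).filter (fun p => p.2 == c)
      = xs.filter (fun p => p.2 == c) := by
  rw [PySem.List.sorted_rev_eq_foldl_insertBy]
  simpa using pvFoldl_insertBy_filter c xs [] (by simp)

-- B characterization -------------------------------------------------------
theorem pvGroups_getD (label : List (String × Int)) (c : Int) :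
    (label.foldl (fun d p => d.modify p.2 [] (fun l => l ++ [p.1]))
        (PySem.Dict.empty : PySem.Dict Int (List String))).getD c []
      = (label.filter (fun p => p.2 == c)).map Prod.fst := by
  have h := PySem.Dict.getD_foldl_modify_append (label.map (fun p => (p.2, p.1)))
      (PySem.Dict.empty : PySem.Dict Int (List String)) c
  rw [List.foldl_map] at h
  simpa [List.filter_map, Function.comp] using h

theorem pvGroups_keys (label : List (String × Int)) :
    (label.foldl (fun d p => d.modify p.2 [] (fun l => l ++ [p.1]))
        (PySem.Dict.empty : PySem.Dict Int (List String))).keys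
      = PySem.Set.ofList (label.map (fun p => p.2)) := by
  have h := PySem.Dict.keys_foldl_modify_key label (fun p => p.2) ([] : List String)
      (fun d p => fun l => l ++ [p.1]) (PySem.Dict.empty : PySem.Dict Int (List String))
  simpa [PySem.Dict.keys_empty, PySem.Set.update_empty] using h

theorem pvAlt_eq (label : List (String × Int)) (n : Int) :
    procesar_label_alt label n
      = (PySem.List.sorted (PySem.Set.ofList (label.map (fun p => p.2))) (fun c => c) true).map
          (fun c => (c, (label.filter (fun p => p.2 == c)).map Prod.fst)) := by
  have hgk := pvGroups_keys label
  have hfresh : ∀ a ∈ PySem.List.sorted (PySem.Set.ofList (label.map (fun p => p.2)))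
      (fun c => c) true,
      (PySem.Dict.empty : PySem.Dict Int (List String)).contains ((fun c => c) a) = false := by
    intro a _
    simp [PySem.Dict.contains_empty]
  have hnodup : ((PySem.List.sorted (PySem.Set.ofList (label.map (fun p => p.2))) (fun c => c)
      true).map (fun c => c)).Nodup := by
    rw [List.map_id']
    exact (PySem.List.sorted_perm _ _ _).symm.nodup (PySem.Set.nodup_ofList _)
  have h := PySem.Dict.items_foldl_insert_fresh
      (PySem.List.sorted (PySem.Set.ofList (label.map (fun p => p.2))) (fun c => c) true)
      (fun c => c)
      (fun c => (label.foldl (fun d p => d.modify p.2 [] (fun l => l ++ [p.1]))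
          (PySem.Dict.empty : PySem.Dict Int (List String))).getD c [])
      (PySem.Dict.empty : PySem.Dict Int (List String)) hfresh hnodup
  show ((PySem.List.sorted (label.foldl (fun d p => d.modify p.2 [] (fun l => l ++ [p.1]))
        (PySem.Dict.empty : PySem.Dict Int (List String))).keys (fun c => c) true).foldl
      (fun d c => d.insert c ((label.foldl (fun d p => d.modify p.2 [] (fun l => l ++ [p.1]))
        (PySem.Dict.empty : PySem.Dict Int (List String))).getD c []))
      (PySem.Dict.empty : PySem.Dict Int (List String))).items = _
  rw [hgk]
  rw [h]
  simp only []
  apply List.map_congr_left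
  intro c _
  rw [pvGroups_getD]

theorem pvAltKeys (label : List (String × Int)) (n : Int) :
    (procesar_label_alt label n).map Prod.fst
      = PySem.List.sorted (PySem.Set.ofList (label.map (fun p => p.2))) (fun c => c) true := by
  rw [pvAlt_eq, List.map_map]
  have h : (Prod.fst ∘ fun c => (c, (label.filter (fun p => p.2 == c)).map Prod.fst))
      = (id : Int → Int) := by
    funext c; rfl
  rw [h, List.map_id]

-- keys of A's dict never become -1 when the minimal community m is not -1
theorem pvStep_keys (m : Int) (hm : m ≠ -1) (st : List String × PySem.Dict Int (List String) × Int)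
    (h : ∀ k ∈ st.2.1.keys, k ≠ (-1 : Int)) (p : String × Int) :
    ∀ k ∈ (pvStep m st p).2.1.keys, k ≠ (-1 : Int) := by
  rcases st with ⟨com, d, cur⟩
  intro k hk
  by_cases h1 : cur = -1
  · subst h1
    by_cases hmp : m = p.2
    · simp [pvStep, hmp, PySem.Dict.mem_keys_insert] at hk
      rcases hk with rfl | hk
      · exact hmp ▸ hm
      · exact h k hk
    · simp [pvStep, hmp] at hk
      exact h k hk
  · by_cases h2 : cur = p.2
    · subst h2
      by_cases hmp : m = p.2
      · simp [pvStep, h1, hmp, PySem.Dict.mem_keys_insert] at hk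
        rcases hk with rfl | hk
        · exact h1
        · exact h k hk
      · simp [pvStep, h1, hmp] at hk
        exact h k hk
    · by_cases hmp : m = p.2
      · simp [pvStep, h1, h2, hmp, PySem.Dict.mem_keys_insert] at hk
        rcases hk with rfl | rfl | hk
        · exact hmp ▸ hm
        · exact h1
        · exact h k hk
      · simp [pvStep, h1, h2, hmp, PySem.Dict.mem_keys_insert] at hk
        rcases hk with rfl | hk
        · exact h1
        · exact h k hk

theorem pvLoop_keys (m : Int) (hm : m ≠ -1) (t : List (String × Int)) :
    ∀ st : List String × PySem.Dict Int (List String) × Int,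
    (∀ k ∈ st.2.1.keys, k ≠ (-1 : Int)) →
    ∀ k ∈ (t.foldl (pvStep m) st).2.1.keys, k ≠ (-1 : Int) := by
  induction t with
  | nil => intro st h; exact h
  | cons p t ih =>
    intro st h
    rw [List.foldl_cons]
    exact ih _ (pvStep_keys m hm st h p)

-- ===== VERDICT (by name: the statement is the Claim_ definition above) =====
theorem procesar_label_spec : Claim_unchanged_procesar_label := by
  unfold Claim_unchanged_procesar_label Spec_procesar_label
  intro label n _ hD
  rcases hs : PySem.List.sorted label (fun p => p.2) true with _ | ⟨p₀, s'⟩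
  · have hl : label = [] := (PySem.List.sorted_eq_nil_iff _ _ _).1 hs
    subst hl
    rfl
  · set M : Int := (PySem.List.pyGetD (PySem.List.sorted label (fun p => p.2) true)
      (PySem.List.len (PySem.List.sorted label (fun p => p.2) true) - 1) ("", 0)).2 with hMdef
    have hA : procesar_label label n
        = ((PySem.List.sorted label (fun p => p.2) true).foldl (pvStep M)
            ([], PySem.Dict.empty, -1)).2.1.items := rfl
    -- the last sorted element and its community
    set q : String × Int := (p₀ :: s').getLast (List.cons_ne_nil _ _) with hqdef
    have hq0 : (p₀ :: s').getLast? = some q := List.getLast?_eq_some_getLast _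
    have hMq : M = q.2 := by
      rw [hMdef, hs]
      have h1 : PySem.List.len (p₀ :: s') - 1 = ((s'.length : Nat) : Int) := by
        simp [PySem.List.len_eq]
      rw [h1, PySem.List.pyGetD_natCast, hqdef, List.getLast_eq_getElem,
        List.getD_eq_getElem _ _ (by simp)]
      simp
      rfl
    -- facts about the sorted list
    have hpair' : (p₀ :: s').Pairwise (fun a b => b.2 ≤ a.2) :=
      hs ▸ PySem.List.sorted_pairwise_rev label (fun p => p.2)
    have hb' : ∀ p ∈ p₀ :: s', p.2 ≤ p₀.2 := by
      intro r hr
      have hr' : r ∈ label := (PySem.List.mem_sorted label (fun p => p.2) true r).1 (hs ▸ hr)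
      exact PySem.List.key_head_sorted_rev_ge label (fun p => p.2) hs r hr'
    have hm' : ∀ p ∈ p₀ :: s', q.2 ≤ p.2 := pvPairwise_getLast_le _ q hpair' hq0
    have hqlab : q ∈ label := by
      have : q ∈ p₀ :: s' := List.getLast_mem _
      exact (PySem.List.mem_sorted label (fun p => p.2) true q).1 (hs ▸ this)
    have hD' : (∃ p ∈ p₀ :: s', p.2 = -1) → -1 ≤ M := by
      rintro ⟨w, hw, hwv⟩
      have hwlab : w ∈ label := (PySem.List.mem_sorted label (fun p => p.2) true w).1 (hs ▸ hw)
      by_contra hcon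
      exact hD ⟨⟨w, hwlab, hwv⟩, ⟨q, hqlab, by omega⟩⟩
    have hlast' : ∀ r, (p₀ :: s').getLast? = some r → r.2 = M := by
      intro r hr
      rw [hq0] at hr
      cases Option.some.inj hr
      exact hMq.symm
    have hcur' : p₀.2 = -1 → ∀ p ∈ p₀ :: s', p.2 = -1 := by
      intro h0 p hp
      have h1 : -1 ≤ M := hD' ⟨p₀, by simp, h0⟩
      have h2 : q.2 ≤ p.2 := hm' p hp
      have h3 : p.2 ≤ p₀.2 := hb' p hp
      rw [hMq] at h1
      omega
    -- A's loop: the first iteration behaves the same from cur = -1 and cur = p₀.2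
    have hswap : (p₀ :: s').foldl (pvStep M) ([], (PySem.Dict.empty : PySem.Dict Int (List String)), -1)
        = (p₀ :: s').foldl (pvStep M) ([], PySem.Dict.empty, p₀.2) := by
      rw [List.foldl_cons, List.foldl_cons]
      congr 1
      by_cases h : p₀.2 = -1 <;> simp [pvStep, h]
    have hloop := pvLoopA M (p₀ :: s') [] PySem.Dict.empty p₀.2 (by simp) hpair' hb'
      (fun p hp => hMq ▸ hm' p hp) hlast' hD' hcur'
    -- A's items are exactly the blocks
    have hkpw : ((pvBlocks p₀.2 [] (p₀ :: s')).map Prod.fst).Pairwise (fun a b => b < a) :=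
      pvBlocks_keys_pairwise _ _ _ hpair' hb'
    have hknd : ((pvBlocks p₀.2 [] (p₀ :: s')).map Prod.fst).Nodup :=
      hkpw.imp (fun h => ne_of_gt h)
    have hitems := PySem.Dict.items_foldl_insert_fresh (pvBlocks p₀.2 [] (p₀ :: s'))
      Prod.fst Prod.snd (PySem.Dict.empty : PySem.Dict Int (List String))
      (by intro a _; simp [PySem.Dict.contains_empty]) hknd
    -- B's sorted distinct communities are exactly the block keys
    have hperm : ((pvBlocks p₀.2 [] (p₀ :: s')).map Prod.fst).Perm
        (PySem.Set.ofList (label.map (fun p => p.2))) := by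
      rw [List.perm_ext_iff_of_nodup hknd (PySem.Set.nodup_ofList _)]
      intro a
      rw [pvBlocks_keys_mem, PySem.Set.mem_ofList]
      constructor
      · rintro (rfl | ha)
        · refine List.mem_map.2 ⟨p₀, ?_, rfl⟩
          exact (PySem.List.mem_sorted label (fun p => p.2) true p₀).1 (hs ▸ List.mem_cons_self ..)
        · rcases List.mem_map.1 ha with ⟨w, hw, rfl⟩
          exact List.mem_map.2 ⟨w, (PySem.List.mem_sorted label (fun p => p.2) true w).1 (hs ▸ hw), rfl⟩
      · intro ha
        rcases List.mem_map.1 ha with ⟨w, hw, rfl⟩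
        have hw' : w ∈ p₀ :: s' := by
          rw [← hs]
          exact (PySem.List.mem_sorted label (fun p => p.2) true w).2 hw
        exact Or.inr (List.mem_map.2 ⟨w, hw', rfl⟩)
    have hsorteq := PySem.List.sorted_rev_eq_of_perm_of_pairwise_gt
      (PySem.Set.ofList (label.map (fun p => p.2)))
      ((pvBlocks p₀.2 [] (p₀ :: s')).map Prod.fst) (fun c => c) hperm hkpw
    -- put everything together
    rw [hA, hs, hswap, hloop, pvAlt_eq, hsorteq]
    have heq : ((pvBlocks p₀.2 [] (p₀ :: s')).foldl
        (fun d p => d.insert p.1 p.2) (PySem.Dict.empty : PySem.Dict Int (List String))).items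
        = pvBlocks p₀.2 [] (p₀ :: s') := by
      simpa using hitems
    rw [heq, List.map_map]
    conv_lhs => rw [← List.map_id (pvBlocks p₀.2 [] (p₀ :: s'))]
    apply List.map_congr_left
    rintro ⟨c, g⟩ hcg
    have hcontent := pvBlocks_content (p₀ :: s') p₀.2 [] hpair' hb' c g hcg
    simp only [ite_self, List.nil_append] at hcontent
    have hstab : (label.filter (fun p => p.2 == c)).map Prod.fst
        = ((p₀ :: s').filter (fun p => p.2 == c)).map Prod.fst := by
      rw [← hs, pvFilter_sorted]
    simp only [id, Function.comp_apply]
    rw [hcontent, hstab]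

theorem procesar_label_changed : Claim_changed_procesar_label := by
  unfold Claim_changed_procesar_label; decide

theorem procesar_label_tight : Claim_exact_procesar_label := by
  unfold Claim_exact_procesar_label
  intro label n _ hD heq
  obtain ⟨⟨w1, hw1, hw1v⟩, ⟨w2, hw2, hw2v⟩⟩ := hD
  -- -1 is a key of B's result …
  have hBmem : (-1 : Int) ∈ (procesar_label_alt label n).map Prod.fst := by
    rw [pvAltKeys, PySem.List.mem_sorted, PySem.Set.mem_ofList]
    exact List.mem_map.2 ⟨w1, hw1, hw1v⟩
  -- … but never a key of A's result, because the last sorted community M is < -1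
  set M : Int := (PySem.List.pyGetD (PySem.List.sorted label (fun p => p.2) true)
      (PySem.List.len (PySem.List.sorted label (fun p => p.2) true) - 1) ("", 0)).2 with hMdef
  have hA : procesar_label label n
      = ((PySem.List.sorted label (fun p => p.2) true).foldl (pvStep M)
          ([], PySem.Dict.empty, -1)).2.1.items := rfl
  rcases hs : PySem.List.sorted label (fun p => p.2) true with _ | ⟨p₀, s'⟩
  · exact absurd ((PySem.List.sorted_eq_nil_iff _ _ _).1 hs ▸ hw1) (List.not_mem_nil)
  · set q : String × Int := (p₀ :: s').getLast (List.cons_ne_nil _ _) with hqdef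
    have hq0 : (p₀ :: s').getLast? = some q := List.getLast?_eq_some_getLast _
    have hMq : M = q.2 := by
      rw [hMdef, hs]
      have h1 : PySem.List.len (p₀ :: s') - 1 = ((s'.length : Nat) : Int) := by
        simp [PySem.List.len_eq]
      rw [h1, PySem.List.pyGetD_natCast, hqdef, List.getLast_eq_getElem,
        List.getD_eq_getElem _ _ (by simp)]
      simp
      rfl
    have hpair' : (p₀ :: s').Pairwise (fun a b => b.2 ≤ a.2) :=
      hs ▸ PySem.List.sorted_pairwise_rev label (fun p => p.2)
    have hw2' : w2 ∈ p₀ :: s' := by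
      rw [← hs]
      exact (PySem.List.mem_sorted label (fun p => p.2) true w2).2 hw2
    have hMlt : M < -1 := by
      have := pvPairwise_getLast_le _ q hpair' hq0 w2 hw2'
      omega
    have hAkeys : ∀ k ∈ (procesar_label label n).map Prod.fst, k ≠ (-1 : Int) := by
      rw [hA, hs]
      have hkeys : (((p₀ :: s').foldl (pvStep M) ([], PySem.Dict.empty, -1)).2.1).items.map Prod.fst
          = (((p₀ :: s').foldl (pvStep M) ([], PySem.Dict.empty, -1)).2.1).keys := rfl
      rw [hkeys]
      exact pvLoop_keys M (by omega) (p₀ :: s') ([], PySem.Dict.empty, -1) (by simp)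
    rw [heq] at hAkeys
    exact hAkeys _ hBmem rfl
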